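-- pv_equiv track=rewrite | github.com/sang4196/practice_cote | python_prj/lv1/20251110/20251110_2.py | solution
-- ===== SOURCE A (Python) =====
-- def solution(numbers, hand):
--     answer = ''
--
--     keypad = [
--         ["1", "2", "3"],
--         ["4", "5", "6"],
--         ["7", "8", "9"],
--         ["*", "0", "#"]
--     ]
--     pos = {key: (row, col) for row, line in enumerate(keypad) for col, key in enumerate(line)}
--     l = "*"
--     r = "#"
--
--     for num in map(str, numbers):
--         if num in ["1","4","7"]:
--             add = "L"
--         elif num in ["3","6","9"]:
--             add = "R"
--         else:
--             push_pos = pos[num]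
--             l_pos = pos[l]
--             r_pos = pos[r]
--
--             l_abs = abs(push_pos[0] - l_pos[0]) + abs(push_pos[1] - l_pos[1])
--             r_abs = abs(push_pos[0] - r_pos[0]) + abs(push_pos[1] - r_pos[1])
--
--             if l_abs > r_abs:
--                 add = "R"
--             elif l_abs < r_abs:
--                 add = "L"
--             else:
--                 if hand:
--                     add = "R"
--                 else:
--                     add = "L"
--         answer += add
--         if add == "R":
--             r = num
--         else:
--             l = num
--
--     return answer
-- ===== SOURCE B (Python) =====
-- def solution(numbers, hand):
--     # divide-and-conquer: solve each half, thread the (left,right) thumb state through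
--     def step(d, lp, rp):
--         row, col = (3, 1) if d == 0 else divmod(d - 1, 3)
--         if col == 0:
--             side = "L"
--         elif col == 2:
--             side = "R"
--         else:
--             diff = (abs(row - lp[0]) + abs(1 - lp[1])) - (abs(row - rp[0]) + abs(1 - rp[1]))
--             side = "R" if diff > 0 or (diff == 0 and hand) else "L"
--         return (side, lp, (row, col)) if side == "R" else (side, (row, col), rp)
--
--     def go(nums, lp, rp):
--         if not nums:
--             return "", lp, rp
--         if len(nums) == 1:
--             return step(nums[0], lp, rp)
--         mid = len(nums) // 2
--         s1, lp, rp = go(nums[:mid], lp, rp)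
--         s2, lp, rp = go(nums[mid:], lp, rp)
--         return s1 + s2, lp, rp
--
--     return go(numbers, (3, 0), (3, 2))[0]
-- ===== Notes on version B (the rewrite author's own statement) =====
-- stated objective: alternative
-- what changed: B replaces A's single accumulating loop over a keypad grid + pos dict by a divide-and-conquer recursion: the list is split in half, each half is solved recursively with the (left,right) thumb state threaded through, halves' strings are concatenated; key coordinates come from closed-form arithmetic (divmod(d-1,3), 0->(3,1)) and the tie-break is one signed-difference test.
import Mathlib
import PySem

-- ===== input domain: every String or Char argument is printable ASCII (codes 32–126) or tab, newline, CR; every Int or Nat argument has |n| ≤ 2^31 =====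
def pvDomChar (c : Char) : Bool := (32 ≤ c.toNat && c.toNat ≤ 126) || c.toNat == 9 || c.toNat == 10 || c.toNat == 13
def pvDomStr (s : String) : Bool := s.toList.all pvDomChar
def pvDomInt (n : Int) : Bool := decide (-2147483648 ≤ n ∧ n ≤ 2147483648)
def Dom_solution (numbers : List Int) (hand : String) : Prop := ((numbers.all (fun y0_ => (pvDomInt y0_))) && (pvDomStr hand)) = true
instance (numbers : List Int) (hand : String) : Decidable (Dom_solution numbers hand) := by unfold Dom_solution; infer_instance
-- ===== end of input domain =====

-- B replaces A's single accumulating loop (keypad grid + pos dict) by a divide-and-conquer recursion with closed-form coordinates; objective: alternative.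


-- ===== PORT A =====
def pvKeypad : List (List String) := [["1","2","3"],["4","5","6"],["7","8","9"],["*","0","#"]]

-- pos = {key: (row, col) for row, line in enumerate(keypad) for col, key in enumerate(line)}
def pvPos : PySem.Dict String (Int × Int) :=
  ((PySem.List.enumerate pvKeypad).flatMap (fun rl =>
      (PySem.List.enumerate rl.2).map (fun ck => (ck.2, (rl.1, ck.1))))).foldl
    (fun d kv => d.insert kv.1 kv.2) PySem.Dict.empty

-- one iteration of A's loop over state (answer, l, r); `none` = KeyError from pos[num]
def pvStepA (hand : String) (st : String × String × String) (n : Int) :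
    Option (String × String × String) :=
  let num := PySem.Int.toStr n
  let add? : Option String :=
    if num ∈ (["1","4","7"] : List String) then some "L"
    else if num ∈ (["3","6","9"] : List String) then some "R"
    else
      match pvPos.get? num, pvPos.get? st.2.1, pvPos.get? st.2.2 with
      | some pushPos, some lPos, some rPos =>
        let lAbs := |pushPos.1 - lPos.1| + |pushPos.2 - lPos.2|
        let rAbs := |pushPos.1 - rPos.1| + |pushPos.2 - rPos.2|
        some (if lAbs > rAbs then "R"
              else if lAbs < rAbs then "L"
              else if hand ≠ "" then "R" else "L")
      | _, _, _ => none
  add?.map (fun add =>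
    (st.1 ++ add, if add = "R" then st.2.1 else num, if add = "R" then num else st.2.2))

def solution (numbers : List Int) (hand : String) : String :=
  ((numbers.foldl (fun acc n => acc.bind (fun st => pvStepA hand st n))
      (some ("", "*", "#"))).map (fun st => st.1)).getD ""

-- ===== PORT B =====
-- (3, 1) if d == 0 else divmod(d - 1, 3)
def pvCoordB (d : Int) : Int × Int :=
  if d = 0 then (3, 1) else (PySem.Int.floordiv (d - 1) 3, PySem.Int.mod (d - 1) 3)

-- B's `step`: one press from thumb state (lp, rp) to (side, lp', rp')
def pvStepB (hand : String) (d : Int) (lp rp : Int × Int) :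
    String × (Int × Int) × (Int × Int) :=
  let c := pvCoordB d
  let side :=
    if c.2 = 0 then "L"
    else if c.2 = 2 then "R"
    else
      let diff := (|c.1 - lp.1| + |1 - lp.2|) - (|c.1 - rp.1| + |1 - rp.2|)
      if diff > 0 ∨ (diff = 0 ∧ hand ≠ "") then "R" else "L"
  if side = "R" then (side, lp, c) else (side, c, rp)

-- B's `go`: divide and conquer, threading the thumb state through the halves.
-- nums[:mid] / nums[mid:] with 0 ≤ mid ≤ len are exactly take/drop; nums[0] on a
-- nonempty list is exactly headI.
def pvGoB (hand : String) (nums : List Int) (lp rp : Int × Int) :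
    String × (Int × Int) × (Int × Int) :=
  if nums = [] then ("", lp, rp)
  else if nums.length = 1 then pvStepB hand nums.headI lp rp
  else
    let mid := nums.length / 2
    let r1 := pvGoB hand (nums.take mid) lp rp
    let r2 := pvGoB hand (nums.drop mid) r1.2.1 r1.2.2
    (r1.1 ++ r2.1, r2.2)
termination_by nums.length
decreasing_by
  · rename_i h0 h1
    have : nums.length ≠ 0 := by simpa [List.length_eq_zero_iff] using h0
    simp only [List.length_take]
    omega
  · rename_i h0 h1
    have : nums.length ≠ 0 := by simpa [List.length_eq_zero_iff] using h0
    simp only [List.length_drop]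
    omega

def solution_alt (numbers : List Int) (hand : String) : String :=
  (pvGoB hand numbers (3, 0) (3, 2)).1

-- ===== PRECONDITION & SPEC =====
-- Pre_ excludes exactly the inputs on which A raises KeyError: any number outside 0..9.
def Pre_solution (numbers : List Int) (hand : String) : Prop :=
  ∀ n ∈ numbers, 0 ≤ n ∧ n ≤ 9
instance (numbers : List Int) (hand : String) : Decidable (Pre_solution numbers hand) := by
  unfold Pre_solution; infer_instance
def pvWitness_solution : List Int × String := ([1, 3, 4, 5, 8, 2, 1, 4, 5, 9, 5], "right")

def Spec_solution (numbers : List Int) (hand : String) (out : String) : Prop := out = solution_alt numbers hand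
instance (numbers : List Int) (hand : String) (out : String) : Decidable (Spec_solution numbers hand out) := by unfold Spec_solution; infer_instance

-- ===== CLAIM (what is proved, stated in full; the proofs are below) =====
def Claim_equal_solution : Prop := ∀ (numbers : List Int) (hand : String), Dom_solution numbers hand → Pre_solution numbers hand → Spec_solution numbers hand (solution numbers hand)

-- ===== LEMMAS AND PROOFS =====

-- linearised form of B's divide-and-conquer (proof-only)
def pvLin (hand : String) : List Int → (Int × Int) → (Int × Int) →
    String × (Int × Int) × (Int × Int)
  | [], lp, rp => ("", lp, rp)
  | d :: rest, lp, rp =>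
    let s := pvStepB hand d lp rp
    let t := pvLin hand rest s.2.1 s.2.2
    (s.1 ++ t.1, t.2)

theorem pvLin_append (hand : String) (xs ys : List Int) (lp rp : Int × Int) :
    pvLin hand (xs ++ ys) lp rp =
      ((pvLin hand xs lp rp).1 ++ (pvLin hand ys (pvLin hand xs lp rp).2.1 (pvLin hand xs lp rp).2.2).1,
       (pvLin hand ys (pvLin hand xs lp rp).2.1 (pvLin hand xs lp rp).2.2).2) := by
  induction xs generalizing lp rp with
  | nil => simp [pvLin]
  | cons d rest ih => simp [pvLin, ih, String.append_assoc]

theorem pvGoB_eq_lin_aux (hand : String) (N : Nat) :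
    ∀ (nums : List Int) (lp rp : Int × Int), nums.length ≤ N →
      pvGoB hand nums lp rp = pvLin hand nums lp rp := by
  induction N with
  | zero =>
    intro nums lp rp h
    have h0 : nums = [] := by cases nums with
      | nil => rfl
      | cons a t => simp at h
    subst h0
    rw [pvGoB]
    simp [pvLin]
  | succ N ih =>
    intro nums lp rp h
    by_cases h0 : nums = []
    · subst h0; rw [pvGoB]; simp [pvLin]
    · by_cases h1 : nums.length = 1
      · obtain ⟨d, hd⟩ : ∃ d, nums = [d] := by
          cases nums with
          | nil => exact absurd rfl h0
          | cons a t => cases t with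
            | nil => exact ⟨a, rfl⟩
            | cons b t' => simp at h1
        subst hd
        rw [pvGoB]
        simp [pvLin]
      · have hlen : nums.length ≠ 0 := by simpa [List.length_eq_zero_iff] using h0
        rw [pvGoB]
        simp only [if_neg h0, if_neg h1]
        rw [ih (nums.take (nums.length / 2)) lp rp
              (by simp only [List.length_take]; omega)]
        rw [ih (nums.drop (nums.length / 2)) _ _
              (by simp only [List.length_drop]; omega)]
        have hsplit := pvLin_append hand (nums.take (nums.length / 2))
          (nums.drop (nums.length / 2)) lp rp
        rw [List.take_append_drop] at hsplit
        rw [hsplit]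

theorem pvGoB_eq_lin (hand : String) (nums : List Int) (lp rp : Int × Int) :
    pvGoB hand nums lp rp = pvLin hand nums lp rp :=
  pvGoB_eq_lin_aux hand nums.length nums lp rp le_rfl

-- the dict lookup of str(d) IS the arithmetic coordinate, for d on the keypad
theorem pvGet_toStr (d : Int) (hd0 : 0 ≤ d) (hd9 : d ≤ 9) :
    pvPos.get? (PySem.Int.toStr d) = some (pvCoordB d) := by
  interval_cases d <;> decide

theorem pvMemL (d : Int) (hd0 : 0 ≤ d) (hd9 : d ≤ 9) :
    PySem.Int.toStr d ∈ (["1","4","7"] : List String) ↔ (pvCoordB d).2 = 0 := by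
  interval_cases d <;> decide

theorem pvMemR (d : Int) (hd0 : 0 ≤ d) (hd9 : d ≤ 9) :
    PySem.Int.toStr d ∈ (["3","6","9"] : List String) ↔ (pvCoordB d).2 = 2 := by
  interval_cases d <;> decide

theorem pvColMid (d : Int) (hd0 : 0 ≤ d) (hd9 : d ≤ 9)
    (h0 : (pvCoordB d).2 ≠ 0) (h2 : (pvCoordB d).2 ≠ 2) : (pvCoordB d).2 = 1 := by
  interval_cases d <;> first | decide | (exact absurd (by decide) h0) | (exact absurd (by decide) h2)

-- one step of A tracks one step of B, through the pos-dict / coordinate correspondence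
theorem pvStep_agree (hand : String) (d : Int) (hd0 : 0 ≤ d) (hd9 : d ≤ 9)
    (ans l r : String) (lp rp : Int × Int)
    (hl : pvPos.get? l = some lp) (hr : pvPos.get? r = some rp) :
    pvStepA hand (ans, l, r) d =
      some (ans ++ (pvStepB hand d lp rp).1,
            if (pvStepB hand d lp rp).1 = "R" then l else PySem.Int.toStr d,
            if (pvStepB hand d lp rp).1 = "R" then PySem.Int.toStr d else r) ∧
    pvPos.get? (if (pvStepB hand d lp rp).1 = "R" then l else PySem.Int.toStr d)
      = some (pvStepB hand d lp rp).2.1 ∧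
    pvPos.get? (if (pvStepB hand d lp rp).1 = "R" then PySem.Int.toStr d else r)
      = some (pvStepB hand d lp rp).2.2 := by
  have hget := pvGet_toStr d hd0 hd9
  by_cases hc0 : (pvCoordB d).2 = 0
  · have hside : (pvStepB hand d lp rp).1 = "L" := by
      simp [pvStepB, hc0]
    have hst : pvStepB hand d lp rp = ("L", pvCoordB d, rp) := by
      simp [pvStepB, hc0]
    rw [hst]
    refine ⟨?_, by simp [hget], by simp [hr]⟩
    simp only [pvStepA, if_pos ((pvMemL d hd0 hd9).mpr hc0), Option.map_some]
  · by_cases hc2 : (pvCoordB d).2 = 2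
    · have hnl : ¬ PySem.Int.toStr d ∈ (["1","4","7"] : List String) := by
        simp [pvMemL d hd0 hd9, hc0]
      have hst : pvStepB hand d lp rp = ("R", lp, pvCoordB d) := by
        simp [pvStepB, hc2]
      rw [hst]
      refine ⟨?_, by simp [hl], by simp [hget]⟩
      simp only [pvStepA, if_neg hnl, if_pos ((pvMemR d hd0 hd9).mpr hc2), Option.map_some]
    · have hc1 := pvColMid d hd0 hd9 hc0 hc2
      have hnl : ¬ PySem.Int.toStr d ∈ (["1","4","7"] : List String) := by
        simp [pvMemL d hd0 hd9, hc0]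
      have hnr : ¬ PySem.Int.toStr d ∈ (["3","6","9"] : List String) := by
        simp [pvMemR d hd0 hd9, hc2]
      have key : ∀ a b : Int, (if a - b > 0 ∨ (a - b = 0 ∧ hand ≠ "") then "R" else "L")
          = (if a > b then "R" else if a < b then "L" else if hand ≠ "" then "R" else "L") := by
        intro a b
        rcases lt_trichotomy a b with h | h | h
        · rw [if_neg (by rintro (h' | ⟨h', _⟩) <;> omega), if_neg (by omega), if_pos h]
        · subst h; simp
        · rw [if_pos (Or.inl (by omega)), if_pos h]
      have hstB : pvStepB hand d lp rp =
          ((if |(pvCoordB d).1 - lp.1| + |(pvCoordB d).2 - lp.2| >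
               |(pvCoordB d).1 - rp.1| + |(pvCoordB d).2 - rp.2| then "R"
            else if |(pvCoordB d).1 - lp.1| + |(pvCoordB d).2 - lp.2| <
               |(pvCoordB d).1 - rp.1| + |(pvCoordB d).2 - rp.2| then "L"
            else if hand ≠ "" then "R" else "L"),
           (if (if |(pvCoordB d).1 - lp.1| + |(pvCoordB d).2 - lp.2| >
               |(pvCoordB d).1 - rp.1| + |(pvCoordB d).2 - rp.2| then "R"
            else if |(pvCoordB d).1 - lp.1| + |(pvCoordB d).2 - lp.2| <
               |(pvCoordB d).1 - rp.1| + |(pvCoordB d).2 - rp.2| then "L"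
            else if hand ≠ "" then "R" else "L") = "R" then lp else pvCoordB d),
           (if (if |(pvCoordB d).1 - lp.1| + |(pvCoordB d).2 - lp.2| >
               |(pvCoordB d).1 - rp.1| + |(pvCoordB d).2 - rp.2| then "R"
            else if |(pvCoordB d).1 - lp.1| + |(pvCoordB d).2 - lp.2| <
               |(pvCoordB d).1 - rp.1| + |(pvCoordB d).2 - rp.2| then "L"
            else if hand ≠ "" then "R" else "L") = "R" then pvCoordB d else rp)) := by
        simp only [pvStepB]
        rw [if_neg hc0, if_neg hc2]
        rw [show ((1 : Int)) = (pvCoordB d).2 from hc1.symm]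
        rw [key]
        by_cases hS : (if |(pvCoordB d).1 - lp.1| + |(pvCoordB d).2 - lp.2| >
               |(pvCoordB d).1 - rp.1| + |(pvCoordB d).2 - rp.2| then "R"
            else if |(pvCoordB d).1 - lp.1| + |(pvCoordB d).2 - lp.2| <
               |(pvCoordB d).1 - rp.1| + |(pvCoordB d).2 - rp.2| then "L"
            else if hand ≠ "" then "R" else "L") = "R"
        · rw [if_pos hS, if_pos hS, if_pos hS]
        · rw [if_neg hS, if_neg hS, if_neg hS]
      rw [hstB]
      refine ⟨?_, ?_, ?_⟩
      · simp only [pvStepA, if_neg hnl, if_neg hnr, hget, hl, hr, Option.map_some]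
      · split_ifs <;> simp [hl, hget]
      · split_ifs <;> simp [hr, hget]

theorem pvFold_agree (hand : String) (numbers : List Int)
    (hp : ∀ n ∈ numbers, 0 ≤ n ∧ n ≤ 9)
    (ans l r : String) (lp rp : Int × Int)
    (hl : pvPos.get? l = some lp) (hr : pvPos.get? r = some rp) :
    ∃ l' r',
      numbers.foldl (fun acc n => acc.bind (fun st => pvStepA hand st n)) (some (ans, l, r))
        = some (ans ++ (pvLin hand numbers lp rp).1, l', r') := by
  induction numbers generalizing ans l r lp rp with
  | nil => exact ⟨l, r, by simp [pvLin]⟩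
  | cons d rest ih =>
    obtain ⟨hA, hl', hr'⟩ :=
      pvStep_agree hand d (hp d (.head _)).1 (hp d (.head _)).2 ans l r lp rp hl hr
    obtain ⟨l', r', hrec⟩ := ih (fun m hm => hp m (.tail _ hm))
      (ans ++ (pvStepB hand d lp rp).1) _ _ _ _ hl' hr'
    refine ⟨l', r', ?_⟩
    simp only [List.foldl_cons, Option.bind_some, hA] at *
    rw [hrec]
    simp [pvLin, String.append_assoc]

-- ===== VERDICT (by name: the statement is the Claim_ definition above) =====
theorem solution_spec : Claim_equal_solution := by
  intro numbers hand _ hpre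
  unfold Spec_solution solution solution_alt
  obtain ⟨l', r', hA⟩ := pvFold_agree hand numbers hpre "" "*" "#" (3, 0) (3, 2)
    (by decide) (by decide)
  rw [hA, pvGoB_eq_lin]
  simp
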